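-- pv_equiv track=rewrite | github.com/pdr9rc/hexy | src/sandbox_generator.py | _get_region_hexes
-- ===== SOURCE A (Python) =====
-- from typing import Dict, List, Optional, Any, Tuple
--
-- def _get_region_hexes(center_hex: str, radius: int) -> List[str]:
--     """Get all hex codes in a region around a center hex."""
--     try:
--         center_x, center_y = int(center_hex[:2]), int(center_hex[2:])
--     except (ValueError, IndexError):
--         return []
--
--     hexes = []
--
--     for dx in range(-radius, radius + 1):
--         for dy in range(-radius, radius + 1):
--             x = center_x + dx
--             y = center_y + dy
--
--             if 1 <= x <= 25 and 1 <= y <= 30: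
--                 hex_code = f"{x:02d}{y:02d}"
--                 hexes.append(hex_code)
--
--     return hexes
-- ===== SOURCE B (Python) =====
-- from typing import List
--
-- def _get_region_hexes(center_hex: str, radius: int) -> List[str]:
--     """Get all hex codes in a region around a center hex."""
--     try:
--         center_x, center_y = int(center_hex[:2]), int(center_hex[2:])
--     except (ValueError, IndexError):
--         return []
--
--     x_lo, x_hi = max(1, center_x - radius), min(25, center_x + radius)
--     y_lo, y_hi = max(1, center_y - radius), min(30, center_y + radius)
--     h, w = x_hi - x_lo + 1, y_hi - y_lo + 1
--     if h <= 0 or w <= 0: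
--         return []
--
--     # single flat loop over cell indices; x/y recovered by divmod
--     return [f"{x_lo + k // w:02d}{y_lo + k % w:02d}" for k in range(h * w)]
-- ===== Notes on version B (the rewrite author's own statement) =====
-- stated objective: faster
-- what changed: Replaces the nested (2r+1)^2 offset scan with a per-cell bounds filter by a closed-form clamped rectangle and ONE flat loop over cell indices 0..h*w-1, decoding each index into (x,y) with divmod; no nested loops and no per-cell guard.
import Mathlib
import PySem

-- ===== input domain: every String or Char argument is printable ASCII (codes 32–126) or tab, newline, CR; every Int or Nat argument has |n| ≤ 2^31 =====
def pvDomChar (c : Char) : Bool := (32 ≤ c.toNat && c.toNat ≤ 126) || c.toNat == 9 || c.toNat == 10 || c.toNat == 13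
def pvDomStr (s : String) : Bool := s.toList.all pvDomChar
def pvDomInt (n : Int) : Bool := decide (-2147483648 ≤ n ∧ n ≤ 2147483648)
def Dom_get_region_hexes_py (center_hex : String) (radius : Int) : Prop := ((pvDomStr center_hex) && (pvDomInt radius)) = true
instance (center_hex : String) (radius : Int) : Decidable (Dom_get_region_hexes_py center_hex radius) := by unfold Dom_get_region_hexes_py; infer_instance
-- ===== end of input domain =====

-- B replaces A's nested (2r+1)^2 offset scan + per-cell bounds filter by a closed-form
-- clamped rectangle and ONE flat loop over cell indices, decoding (x,y) by divmod.

-- shared with both Pythons: the f-string f"{..:02d}{..:02d}"; ported as zfill(str(n), 2),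
-- exact here because both programs only format in-grid values (1..30).
def pvFmt0202 (x y : Int) : String :=
  String.mk (PySem.Chars.zfill (PySem.Int.toChars x) 2 ++ PySem.Chars.zfill (PySem.Int.toChars y) 2)

-- shared with both Pythons: the identical 'int(center_hex[:2]), int(center_hex[2:])' parse
def pvParseCenter (center_hex : String) : Option (Int × Int) :=
  match PySem.Int.ofChars? (PySem.List.slice center_hex.toList none (some 2)),
        PySem.Int.ofChars? (PySem.List.slice center_hex.toList (some 2) none) with
  | some cx, some cy => some (cx, cy)
  | _, _ => none

-- ===== PORT A =====
def get_region_hexes_py (center_hex : String) (radius : Int) : List String :=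
  match pvParseCenter center_hex with
  | none => []
  | some (center_x, center_y) =>
    (PySem.List.pyRange (-radius) (radius + 1) 1).foldl (fun hexes dx =>
      (PySem.List.pyRange (-radius) (radius + 1) 1).foldl (fun hexes dy =>
        let x := center_x + dx
        let y := center_y + dy
        if 1 ≤ x ∧ x ≤ 25 ∧ 1 ≤ y ∧ y ≤ 30 then hexes ++ [pvFmt0202 x y] else hexes)
        hexes)
      []

-- ===== PORT B =====
def get_region_hexes_py_alt (center_hex : String) (radius : Int) : List String :=
  match pvParseCenter center_hex with
  | none => []
  | some (center_x, center_y) =>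
    let x_lo := max 1 (center_x - radius)
    let x_hi := min 25 (center_x + radius)
    let y_lo := max 1 (center_y - radius)
    let y_hi := min 30 (center_y + radius)
    let h := x_hi - x_lo + 1
    let w := y_hi - y_lo + 1
    if h ≤ 0 ∨ w ≤ 0 then []
    else (PySem.List.pyRange 0 (h * w) 1).map (fun k =>
      pvFmt0202 (x_lo + PySem.Int.floordiv k w) (y_lo + PySem.Int.mod k w))

-- ===== PRECONDITION & SPEC =====
def Spec_get_region_hexes_py (center_hex : String) (radius : Int) (out : List String) : Prop := out = get_region_hexes_py_alt center_hex radius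
instance (center_hex : String) (radius : Int) (out : List String) : Decidable (Spec_get_region_hexes_py center_hex radius out) := by unfold Spec_get_region_hexes_py; infer_instance

-- ===== CLAIM =====
def Claim_equal_get_region_hexes_py : Prop := ∀ (center_hex : String) (radius : Int), Dom_get_region_hexes_py center_hex radius → Spec_get_region_hexes_py center_hex radius (get_region_hexes_py center_hex radius)

-- ===== LEMMAS AND PROOFS =====

-- shifting a range: (range(a, b)).map (c + ·) = range(c+a, c+b)
theorem pvRange_shift (c a b : Int) :
    (PySem.List.pyRange a b 1).map (fun d => c + d) = PySem.List.pyRange (c + a) (c + b) 1 := by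
  rw [PySem.List.pyRange_one, PySem.List.pyRange_one, List.map_map]
  have : c + b - (c + a) = b - a := by ring
  rw [this]
  exact List.map_congr_left (fun k _ => by simp; ring)

-- clamping: filtering an ascending unit range by lo ≤ v ≤ hi yields the clamped range
theorem pvRange_clamp (lo hi : Int) : ∀ (n : Nat) (a b : Int), (b - a).toNat = n →
    (PySem.List.pyRange a b 1).filter (fun v => decide (lo ≤ v ∧ v ≤ hi))
      = PySem.List.pyRange (max a lo) (min b (hi + 1)) 1 := by
  intro n
  induction n with
  | zero =>
    intro a b h
    have hba : b ≤ a := by omega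
    rw [PySem.List.pyRange_one_eq_nil hba, PySem.List.pyRange_one_eq_nil (by omega)]
    rfl
  | succ m ih =>
    intro a b h
    have hab : a < b := by omega
    rw [PySem.List.pyRange_one_cons hab, List.filter_cons]
    by_cases ha : lo ≤ a ∧ a ≤ hi
    · have h1 : max a lo = a := by omega
      have h2 : max (a + 1) lo = a + 1 := by omega
      rw [if_pos (by simp only [decide_eq_true_eq]; exact ha),
        ih (a + 1) b (by omega), h1, h2,
        ← PySem.List.pyRange_one_cons (by omega)]
    · rw [if_neg (by simp only [decide_eq_true_eq]; exact ha),
        ih (a + 1) b (by omega)]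
      by_cases hlo : a < lo
      · have : max (a + 1) lo = max a lo := by omega
        rw [this]
      · have hhi : hi < a := by omega
        rw [PySem.List.pyRange_one_eq_nil (by omega), PySem.List.pyRange_one_eq_nil (by omega)]

-- a flatMap whose body is guarded by 'if p x then … else []' is a flatMap over the filtered list
theorem pvFlatMap_ite {α β : Type} (l : List α) (p : α → Prop) [DecidablePred p] (g : α → List β) :
    (l.flatMap (fun x => if p x then g x else [])) = (l.filter (fun x => decide (p x))).flatMap g := by
  induction l with
  | nil => rfl
  | cons x t ih =>
    rw [List.flatMap_cons, List.filter_cons]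
    by_cases hx : p x
    · simp only [hx, decide_true, if_true, List.flatMap_cons, ih]
    · simp only [hx, decide_false, if_false, ih, Bool.false_eq_true, List.nil_append]

-- the divmod decoding of a flat index range is exactly the row-major double range
theorem pvDivmodGrid {α : Type} (g : Int → Int → α) (w x_lo y_lo : Int) (hw : 0 < w) :
    ∀ (n : Nat),
    (PySem.List.pyRange 0 ((n : Int) * w) 1).map (fun k =>
        g (x_lo + PySem.Int.floordiv k w) (y_lo + PySem.Int.mod k w))
      = (PySem.List.pyRange x_lo (x_lo + n) 1).flatMap (fun x =>
          (PySem.List.pyRange y_lo (y_lo + w) 1).map (fun y => g x y)) := by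
  intro n
  induction n with
  | zero =>
    simp [PySem.List.pyRange_one_eq_nil (le_refl 0)]
  | succ m ih =>
    have hm : (0:Int) ≤ (m : Int) * w := by positivity
    have hsplit : ((m + 1 : Nat) : Int) * w = (m : Int) * w + w := by push_cast; ring
    rw [hsplit,
      PySem.List.pyRange_one_append 0 ((m : Int) * w) ((m : Int) * w + w) hm (by omega),
      List.map_append, ih]
    have hx : x_lo + ((m + 1 : Nat) : Int) = (x_lo + (m : Int)) + 1 := by push_cast; ring
    rw [hx, PySem.List.pyRange_one_succ_right (by omega), List.flatMap_append]
    congr 1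
    -- the last block: indices m*w .. m*w + w - 1 decode to row x_lo + m
    rw [List.flatMap_cons, List.flatMap_nil, List.append_nil]
    have hshift := pvRange_shift ((m : Int) * w) 0 w
    rw [add_zero] at hshift
    have hyshift := pvRange_shift y_lo 0 w
    rw [add_zero] at hyshift
    rw [← hshift, ← hyshift, List.map_map, List.map_map]
    refine List.map_congr_left (fun r hr => ?_)
    rw [PySem.List.mem_pyRange_one] at hr
    have hfd : PySem.Int.floordiv ((m : Int) * w + r) w = (m : Int) := by
      rw [PySem.Int.floordiv_eq_ediv_of_pos hw]
      rw [add_comm, Int.add_mul_ediv_right r (m : Int) (by omega)]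
      rw [Int.ediv_eq_zero_of_lt hr.1 hr.2]
      ring
    have hmd : PySem.Int.mod ((m : Int) * w + r) w = r := by
      rw [PySem.Int.mod_eq_emod_of_pos hw]
      rw [add_comm, mul_comm, Int.add_mul_emod_self_left]
      exact Int.emod_eq_of_lt hr.1 hr.2
    simp only [Function.comp_apply, hfd, hmd]

-- one row of A: the inner filtered dy-scan is the clamped y-range row (empty if x is off-grid)
theorem pvRowEq (cx cy radius dx : Int) :
    ((PySem.List.pyRange (-radius) (radius + 1) 1).filter (fun dy =>
        decide (1 ≤ cx + dx ∧ cx + dx ≤ 25 ∧ 1 ≤ cy + dy ∧ cy + dy ≤ 30))).map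
        (fun dy => pvFmt0202 (cx + dx) (cy + dy))
      = if 1 ≤ cx + dx ∧ cx + dx ≤ 25 then
          (PySem.List.pyRange (max 1 (cy - radius)) (min 30 (cy + radius) + 1) 1).map
            (fun y => pvFmt0202 (cx + dx) y)
        else [] := by
  by_cases hx : 1 ≤ cx + dx ∧ cx + dx ≤ 25
  · rw [if_pos hx]
    have hfc : (PySem.List.pyRange (-radius) (radius + 1) 1).filter (fun dy =>
        decide (1 ≤ cx + dx ∧ cx + dx ≤ 25 ∧ 1 ≤ cy + dy ∧ cy + dy ≤ 30))
        = (PySem.List.pyRange (-radius) (radius + 1) 1).filter (fun dy =>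
            decide (1 ≤ cy + dy ∧ cy + dy ≤ 30)) := by
      refine List.filter_congr (fun dy _ => ?_)
      simp [hx.1, hx.2]
    rw [hfc]
    -- transport along the shift dy ↦ cy + dy, then clamp
    have hfm : ∀ (l : List Int),
        (l.filter (fun dy => decide (1 ≤ cy + dy ∧ cy + dy ≤ 30))).map (fun dy => pvFmt0202 (cx + dx) (cy + dy))
        = ((l.map (fun dy => cy + dy)).filter (fun y => decide (1 ≤ y ∧ y ≤ 30))).map (fun y => pvFmt0202 (cx + dx) y) := by
      intro l
      rw [List.filter_map, List.map_map]
      rfl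
    rw [hfm, pvRange_shift,
      pvRange_clamp 1 30 (cy + (radius + 1) - (cy + -radius)).toNat (cy + -radius) (cy + (radius + 1)) rfl]
    have e1 : max (cy + -radius) 1 = max 1 (cy - radius) := by omega
    have e2 : min (cy + (radius + 1)) (30 + 1) = min 30 (cy + radius) + 1 := by omega
    rw [e1, e2]
  · rw [if_neg hx]
    have : (PySem.List.pyRange (-radius) (radius + 1) 1).filter (fun dy =>
        decide (1 ≤ cx + dx ∧ cx + dx ≤ 25 ∧ 1 ≤ cy + dy ∧ cy + dy ≤ 30)) = [] := by
      refine List.filter_eq_nil_iff.mpr (fun dy _ => ?_)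
      simp only [decide_eq_true_eq]
      tauto
    rw [this, List.map_nil]

-- A in canonical form: flatMap over the clamped x-range of the clamped y-row
theorem pvA_canonical (cx cy radius : Int) :
    (PySem.List.pyRange (-radius) (radius + 1) 1).foldl (fun hexes dx =>
      (PySem.List.pyRange (-radius) (radius + 1) 1).foldl (fun hexes dy =>
        let x := cx + dx
        let y := cy + dy
        if 1 ≤ x ∧ x ≤ 25 ∧ 1 ≤ y ∧ y ≤ 30 then
          hexes ++ [pvFmt0202 x y] else hexes) hexes) []
    = (PySem.List.pyRange (max 1 (cx - radius)) (min 25 (cx + radius) + 1) 1).flatMap (fun x =>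
        (PySem.List.pyRange (max 1 (cy - radius)) (min 30 (cy + radius) + 1) 1).map (fun y =>
          pvFmt0202 x y)) := by
  show (PySem.List.pyRange (-radius) (radius + 1) 1).foldl (fun hexes dx =>
      (PySem.List.pyRange (-radius) (radius + 1) 1).foldl (fun hexes dy =>
        if 1 ≤ cx + dx ∧ cx + dx ≤ 25 ∧ 1 ≤ cy + dy ∧ cy + dy ≤ 30 then
          hexes ++ [pvFmt0202 (cx + dx) (cy + dy)] else hexes) hexes) []
    = (PySem.List.pyRange (max 1 (cx - radius)) (min 25 (cx + radius) + 1) 1).flatMap (fun x =>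
        (PySem.List.pyRange (max 1 (cy - radius)) (min 30 (cy + radius) + 1) 1).map (fun y =>
          pvFmt0202 x y))
  have hinner : (fun (hexes : List String) (dx : Int) =>
      (PySem.List.pyRange (-radius) (radius + 1) 1).foldl (fun hexes dy =>
        if 1 ≤ cx + dx ∧ cx + dx ≤ 25 ∧ 1 ≤ cy + dy ∧ cy + dy ≤ 30 then
          hexes ++ [pvFmt0202 (cx + dx) (cy + dy)] else hexes) hexes)
      = (fun (hexes : List String) (dx : Int) => hexes ++
          ((PySem.List.pyRange (-radius) (radius + 1) 1).filter (fun dy =>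
            decide (1 ≤ cx + dx ∧ cx + dx ≤ 25 ∧ 1 ≤ cy + dy ∧ cy + dy ≤ 30))).map
            (fun dy => pvFmt0202 (cx + dx) (cy + dy))) := by
    funext hexes dx
    exact PySem.List.foldl_append_ite
      (fun dy => 1 ≤ cx + dx ∧ cx + dx ≤ 25 ∧ 1 ≤ cy + dy ∧ cy + dy ≤ 30)
      (fun dy => pvFmt0202 (cx + dx) (cy + dy))
      (PySem.List.pyRange (-radius) (radius + 1) 1) hexes
  rw [hinner, PySem.List.foldl_append_eq_flatMap, List.nil_append]
  have hrows : (PySem.List.pyRange (-radius) (radius + 1) 1).flatMap (fun dx =>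
      ((PySem.List.pyRange (-radius) (radius + 1) 1).filter (fun dy =>
        decide (1 ≤ cx + dx ∧ cx + dx ≤ 25 ∧ 1 ≤ cy + dy ∧ cy + dy ≤ 30))).map
        (fun dy => pvFmt0202 (cx + dx) (cy + dy)))
      = (PySem.List.pyRange (-radius) (radius + 1) 1).flatMap (fun dx =>
          if 1 ≤ cx + dx ∧ cx + dx ≤ 25 then
            (PySem.List.pyRange (max 1 (cy - radius)) (min 30 (cy + radius) + 1) 1).map
              (fun y => pvFmt0202 (cx + dx) y)
          else []) := by
    refine List.flatMap_congr (fun dx _ => ?_)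
    exact pvRowEq cx cy radius dx
  rw [hrows, pvFlatMap_ite (PySem.List.pyRange (-radius) (radius + 1) 1)
    (fun dx => 1 ≤ cx + dx ∧ cx + dx ≤ 25)
    (fun dx => (PySem.List.pyRange (max 1 (cy - radius)) (min 30 (cy + radius) + 1) 1).map
      (fun y => pvFmt0202 (cx + dx) y))]
  -- transport along dx ↦ cx + dx, then clamp the x-range
  have hfm : ((PySem.List.pyRange (-radius) (radius + 1) 1).filter (fun dx =>
        decide (1 ≤ cx + dx ∧ cx + dx ≤ 25))).flatMap (fun dx =>
          (PySem.List.pyRange (max 1 (cy - radius)) (min 30 (cy + radius) + 1) 1).map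
            (fun y => pvFmt0202 (cx + dx) y))
      = (((PySem.List.pyRange (-radius) (radius + 1) 1).map (fun dx => cx + dx)).filter (fun x =>
          decide (1 ≤ x ∧ x ≤ 25))).flatMap (fun x =>
            (PySem.List.pyRange (max 1 (cy - radius)) (min 30 (cy + radius) + 1) 1).map
              (fun y => pvFmt0202 x y)) := by
    rw [List.filter_map, List.flatMap_map]
    rfl
  rw [hfm, pvRange_shift,
    pvRange_clamp 1 25 (cx + (radius + 1) - (cx + -radius)).toNat (cx + -radius) (cx + (radius + 1)) rfl]
  have e1 : max (cx + -radius) 1 = max 1 (cx - radius) := by omega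
  have e2 : min (cx + (radius + 1)) (25 + 1) = min 25 (cx + radius) + 1 := by omega
  rw [e1, e2]

-- ===== VERDICT =====
theorem get_region_hexes_py_spec : Claim_equal_get_region_hexes_py := by
  intro center_hex radius _
  unfold Spec_get_region_hexes_py get_region_hexes_py get_region_hexes_py_alt
  cases hp : pvParseCenter center_hex with
  | none => rfl
  | some cxy =>
    obtain ⟨cx, cy⟩ := cxy
    simp only
    rw [pvA_canonical cx cy radius]
    set x_lo := max 1 (cx - radius) with hxlo
    set x_hi := min 25 (cx + radius) with hxhi
    set y_lo := max 1 (cy - radius) with hylo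
    set y_hi := min 30 (cy + radius) with hyhi
    by_cases hdeg : x_hi - x_lo + 1 ≤ 0 ∨ y_hi - y_lo + 1 ≤ 0
    · rw [if_pos hdeg]
      rcases hdeg with hdeg | hdeg
      · rw [show PySem.List.pyRange x_lo (x_hi + 1) 1 = [] from
          PySem.List.pyRange_one_eq_nil (by omega)]
        rfl
      · refine List.flatMap_eq_nil_iff.mpr (fun x _ => ?_)
        rw [show PySem.List.pyRange y_lo (y_hi + 1) 1 = [] from
          PySem.List.pyRange_one_eq_nil (by omega)]
        rfl
    · rw [if_neg hdeg]
      rw [not_or, not_le, not_le] at hdeg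
      have hw : 0 < y_hi - y_lo + 1 := hdeg.2
      have hh : 0 < x_hi - x_lo + 1 := hdeg.1
      have hn : ((x_hi - x_lo + 1).toNat : Int) = x_hi - x_lo + 1 := by omega
      rw [← hn, pvDivmodGrid (fun x y => pvFmt0202 x y) (y_hi - y_lo + 1) x_lo y_lo hw
        (x_hi - x_lo + 1).toNat]
      have e1 : x_lo + ((x_hi - x_lo + 1).toNat : Int) = x_hi + 1 := by omega
      have e2 : y_lo + (y_hi - y_lo + 1) = y_hi + 1 := by omega
      rw [e1, e2]
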